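-- pv_equiv track=rewrite | github.com/daravenrk/TeamWriter | agent_stack/api_server.py | _fallback_repair_guidance
-- ===== SOURCE A (Python) =====
-- from typing import Dict, Optional, List, Any
--
-- def _fallback_repair_guidance(issues: List[str]) -> str:
--     issues = [str(item) for item in (issues or []) if str(item)]
--     if not issues:
--         return "Inspect 03_canon fallback artifacts, regenerate canon fallback if needed, then clear hold and retry."
--
--     if "fallback_checksum_mismatch" in issues:
--         return "canon.json no longer matches canon_fallback_metadata.json; restore matching artifacts or regenerate the canon fallback before retrying."
--     if "fallback_contract_failed" in issues:
--         return "fallback_contract_report.json indicates missing semantic anchors; repair or regenerate the canon fallback before retrying."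
--     if any(issue in issues for issue in {"fallback_metadata_missing", "fallback_metadata_invalid_json", "fallback_metadata_flag_invalid", "fallback_metadata_stage_mismatch"}):
--         return "canon fallback metadata is missing or invalid; recreate canon_fallback_metadata.json from a fresh fallback generation before retrying."
--     if any(issue in issues for issue in {"fallback_contract_missing", "fallback_contract_invalid_json"}):
--         return "fallback contract report is missing or invalid; regenerate fallback_contract_report.json from a verified canon fallback before retrying."
--     if any(issue in issues for issue in {"fallback_checksum_missing", "fallback_payload_missing_or_invalid"}):
--         return "canon fallback payload or checksum is incomplete; regenerate canon fallback artifacts before retrying."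
--     if "fallback_artifact_stale" in issues:
--         return "fallback artifact is stale; regenerate the stage fallback from fresh inputs before retrying (avoid manual artifact patching)."
--     if any(issue in issues for issue in {"fallback_generated_at_missing", "fallback_generated_at_unparseable"}):
--         return "fallback metadata generated_at is missing or invalid; regenerate fallback metadata and contract artifacts before retrying."
--
--     return "Inspect 03_canon fallback artifacts, repair integrity mismatches, then clear hold and retry."
-- ===== SOURCE B (Python) =====
-- from typing import Dict, Optional, List, Any
--
-- _EMPTY_MSG = "Inspect 03_canon fallback artifacts, regenerate canon fallback if needed, then clear hold and retry."
-- _UNMATCHED_MSG = "Inspect 03_canon fallback artifacts, repair integrity mismatches, then clear hold and retry."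
--
-- # Guidance messages indexed by priority rank (0 = highest).
-- _MESSAGES = [
--     "canon.json no longer matches canon_fallback_metadata.json; restore matching artifacts or regenerate the canon fallback before retrying.",
--     "fallback_contract_report.json indicates missing semantic anchors; repair or regenerate the canon fallback before retrying.",
--     "canon fallback metadata is missing or invalid; recreate canon_fallback_metadata.json from a fresh fallback generation before retrying.",
--     "fallback contract report is missing or invalid; regenerate fallback_contract_report.json from a verified canon fallback before retrying.",
--     "canon fallback payload or checksum is incomplete; regenerate canon fallback artifacts before retrying.",
--     "fallback artifact is stale; regenerate the stage fallback from fresh inputs before retrying (avoid manual artifact patching).",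
--     "fallback metadata generated_at is missing or invalid; regenerate fallback metadata and contract artifacts before retrying.",
-- ]
--
-- # Each known issue code mapped to its priority rank.
-- _PRIORITY = {
--     "fallback_checksum_mismatch": 0,
--     "fallback_contract_failed": 1,
--     "fallback_metadata_missing": 2,
--     "fallback_metadata_invalid_json": 2,
--     "fallback_metadata_flag_invalid": 2,
--     "fallback_metadata_stage_mismatch": 2,
--     "fallback_contract_missing": 3,
--     "fallback_contract_invalid_json": 3,
--     "fallback_checksum_missing": 4,
--     "fallback_payload_missing_or_invalid": 4,
--     "fallback_artifact_stale": 5,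
--     "fallback_generated_at_missing": 6,
--     "fallback_generated_at_unparseable": 6,
-- }
--
-- def _fallback_repair_guidance(issues: List[str]) -> str:
--     # Single pass: track whether any non-empty issue exists and the minimum
--     # priority rank among recognized codes; the answer is determined by that rank.
--     nonempty = False
--     best = None
--     for item in (issues or []):
--         s = str(item)
--         if not s:
--             continue
--         nonempty = True
--         rank = _PRIORITY.get(s)
--         if rank is not None and (best is None or rank < best):
--             best = rank
--     if not nonempty:
--         return _EMPTY_MSG
--     if best is None:
--         return _UNMATCHED_MSG
--     return _MESSAGES[best]
-- ===== Notes on version B (the rewrite author's own statement) =====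
-- stated objective: faster
-- what changed: Replaces the priority-ordered if-cascade of list membership tests with a single pass over the issues that reduces to the minimum priority rank via a code-to-rank map, then indexes the message table by that rank.
import Mathlib
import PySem

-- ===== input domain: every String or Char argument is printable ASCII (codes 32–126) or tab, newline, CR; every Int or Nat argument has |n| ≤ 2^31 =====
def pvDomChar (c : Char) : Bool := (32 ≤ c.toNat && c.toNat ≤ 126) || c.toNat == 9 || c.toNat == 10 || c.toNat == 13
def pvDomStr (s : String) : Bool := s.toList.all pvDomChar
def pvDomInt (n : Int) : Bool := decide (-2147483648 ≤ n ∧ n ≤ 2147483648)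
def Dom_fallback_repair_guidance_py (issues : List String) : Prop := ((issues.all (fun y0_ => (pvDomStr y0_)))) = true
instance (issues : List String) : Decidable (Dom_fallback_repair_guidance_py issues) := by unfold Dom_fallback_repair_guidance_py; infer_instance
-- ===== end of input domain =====

-- B replaces A's if-cascade of membership scans with a single pass computing the
-- minimum priority rank of the issues via a code-to-rank map; objective: faster (measured).

-- ===== PORT A =====
-- literal port of A's if-cascade; 'any(issue in issues for issue in {…})' is a pure
-- disjunction of memberships, ported in the written order (exact).
def fallback_repair_guidance_py (issues : List String) : String :=
  let issues := issues.filter (fun item => item ≠ "")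
  if issues = [] then
    "Inspect 03_canon fallback artifacts, regenerate canon fallback if needed, then clear hold and retry."
  else if issues.contains "fallback_checksum_mismatch" then
    "canon.json no longer matches canon_fallback_metadata.json; restore matching artifacts or regenerate the canon fallback before retrying."
  else if issues.contains "fallback_contract_failed" then
    "fallback_contract_report.json indicates missing semantic anchors; repair or regenerate the canon fallback before retrying."
  else if issues.contains "fallback_metadata_missing" || issues.contains "fallback_metadata_invalid_json" || issues.contains "fallback_metadata_flag_invalid" || issues.contains "fallback_metadata_stage_mismatch" then
    "canon fallback metadata is missing or invalid; recreate canon_fallback_metadata.json from a fresh fallback generation before retrying."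
  else if issues.contains "fallback_contract_missing" || issues.contains "fallback_contract_invalid_json" then
    "fallback contract report is missing or invalid; regenerate fallback_contract_report.json from a verified canon fallback before retrying."
  else if issues.contains "fallback_checksum_missing" || issues.contains "fallback_payload_missing_or_invalid" then
    "canon fallback payload or checksum is incomplete; regenerate canon fallback artifacts before retrying."
  else if issues.contains "fallback_artifact_stale" then
    "fallback artifact is stale; regenerate the stage fallback from fresh inputs before retrying (avoid manual artifact patching)."
  else if issues.contains "fallback_generated_at_missing" || issues.contains "fallback_generated_at_unparseable" then
    "fallback metadata generated_at is missing or invalid; regenerate fallback metadata and contract artifacts before retrying."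
  else
    "Inspect 03_canon fallback artifacts, repair integrity mismatches, then clear hold and retry."

-- ===== PORT B =====
-- Source B's message table, indexed by priority rank
def pvMessages : List String :=
  [ "canon.json no longer matches canon_fallback_metadata.json; restore matching artifacts or regenerate the canon fallback before retrying.",
    "fallback_contract_report.json indicates missing semantic anchors; repair or regenerate the canon fallback before retrying.",
    "canon fallback metadata is missing or invalid; recreate canon_fallback_metadata.json from a fresh fallback generation before retrying.",
    "fallback contract report is missing or invalid; regenerate fallback_contract_report.json from a verified canon fallback before retrying.",
    "canon fallback payload or checksum is incomplete; regenerate canon fallback artifacts before retrying.",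
    "fallback artifact is stale; regenerate the stage fallback from fresh inputs before retrying (avoid manual artifact patching).",
    "fallback metadata generated_at is missing or invalid; regenerate fallback metadata and contract artifacts before retrying." ]

-- Source B's _PRIORITY dict as an association list (all keys distinct)
def pvPriority : List (String × Int) :=
  [ ("fallback_checksum_mismatch", 0),
    ("fallback_contract_failed", 1),
    ("fallback_metadata_missing", 2),
    ("fallback_metadata_invalid_json", 2),
    ("fallback_metadata_flag_invalid", 2),
    ("fallback_metadata_stage_mismatch", 2),
    ("fallback_contract_missing", 3),
    ("fallback_contract_invalid_json", 3),
    ("fallback_checksum_missing", 4),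
    ("fallback_payload_missing_or_invalid", 4),
    ("fallback_artifact_stale", 5),
    ("fallback_generated_at_missing", 6),
    ("fallback_generated_at_unparseable", 6) ]

-- dict.get: first-match lookup in the association list
def pvDictGet (d : List (String × Int)) (k : String) : Option Int :=
  match d with
  | [] => none
  | (k', v) :: rest => if k = k' then some v else pvDictGet rest k

-- one iteration of Source B's loop body over the state (nonempty, best)
def pvStep (st : Bool × Option Int) (item : String) : Bool × Option Int :=
  if item = "" then st
  else
    let best :=
      match pvDictGet pvPriority item with
      | none => st.2
      | some r =>
        match st.2 with
        | none => some r
        | some b => if r < b then some r else some b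
    (true, best)

def fallback_repair_guidance_py_alt (issues : List String) : String :=
  let st := issues.foldl pvStep (false, none)
  if st.1 = false then
    "Inspect 03_canon fallback artifacts, regenerate canon fallback if needed, then clear hold and retry."
  else
    match st.2 with
    | none => "Inspect 03_canon fallback artifacts, repair integrity mismatches, then clear hold and retry."
    | some b =>
      match PySem.List.pyGet? pvMessages b with
      | some m => m
      | none => ""  -- IndexError case; unreachable: every rank in pvPriority is 0..6

-- ===== PRECONDITION & SPEC =====
def Spec_fallback_repair_guidance_py (issues : List String) (out : String) : Prop := out = fallback_repair_guidance_py_alt issues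
instance (issues : List String) (out : String) : Decidable (Spec_fallback_repair_guidance_py issues out) := by unfold Spec_fallback_repair_guidance_py; infer_instance

-- ===== CLAIM (what is proved, stated in full; the proofs are below) =====
def Claim_equal_fallback_repair_guidance_py : Prop := ∀ (issues : List String), Dom_fallback_repair_guidance_py issues → Spec_fallback_repair_guidance_py issues (fallback_repair_guidance_py issues)

-- ===== LEMMAS AND PROOFS =====

-- 'min' on Option Int with none = +inf, keeping the left value on ties (= Source B's update)
def pvOmin (a b : Option Int) : Option Int :=
  match a, b with
  | a, none => a
  | none, some r => some r
  | some x, some r => if r < x then some r else some x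

def pvRank (s : String) : Option Int := pvDictGet pvPriority s

-- the minimum rank occurring in a list
def pvMin (l : List String) : Option Int :=
  l.foldl (fun acc s => pvOmin acc (pvRank s)) none

theorem pvOmin_none_left (b : Option Int) : pvOmin none b = b := by
  cases b <;> rfl

theorem pvOmin_some (x y : Int) : pvOmin (some x) (some y) = some (min x y) := by
  simp only [pvOmin]
  split_ifs <;> simp <;> omega

theorem pvOmin_none_right (a : Option Int) : pvOmin a none = a := by
  cases a <;> rfl

theorem pvOmin_assoc (a b c : Option Int) :
    pvOmin (pvOmin a b) c = pvOmin a (pvOmin b c) := by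
  cases a <;> cases b <;> cases c <;>
    simp only [pvOmin_none_left, pvOmin_none_right, pvOmin_some, min_assoc]

theorem pvFold_omin (l : List String) (b : Option Int) :
    l.foldl (fun acc s => pvOmin acc (pvRank s)) b = pvOmin b (pvMin l) := by
  induction l generalizing b with
  | nil => cases b <;> rfl
  | cons a t ih =>
      have h1 : pvMin (a :: t) = pvOmin (pvRank a) (pvMin t) := by
        rw [show pvMin (a :: t) =
              List.foldl (fun acc s => pvOmin acc (pvRank s)) (pvOmin none (pvRank a)) t from rfl,
            pvOmin_none_left, ih]
      rw [List.foldl_cons, ih, h1, pvOmin_assoc]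

theorem pvMin_cons (a : String) (t : List String) :
    pvMin (a :: t) = pvOmin (pvRank a) (pvMin t) := by
  rw [show pvMin (a :: t) =
        List.foldl (fun acc s => pvOmin acc (pvRank s)) (pvOmin none (pvRank a)) t from rfl,
      pvOmin_none_left, pvFold_omin]

-- Source B's loop = (did any non-empty item occur, minimum rank of the non-empty items)
theorem pvLoop_eq (l : List String) (ne : Bool) (best : Option Int) :
    l.foldl pvStep (ne, best) =
      ((ne || !(l.filter (fun item => item ≠ "")).isEmpty),
        pvOmin best (pvMin (l.filter (fun item => item ≠ "")))) := by
  induction l generalizing ne best with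
  | nil => cases best <;> simp [pvMin, pvOmin]
  | cons a t ih =>
      by_cases ha : a = ""
      · have hstep : pvStep (ne, best) a = (ne, best) := by
          unfold pvStep
          rw [if_pos ha]
        have hfc : (a :: t).filter (fun item => item ≠ "") =
            t.filter (fun item => item ≠ "") := by
          simp [ha]
        rw [List.foldl_cons, hstep, ih, hfc]
      · have hstep : pvStep (ne, best) a = (true, pvOmin best (pvRank a)) := by
          unfold pvStep
          rw [if_neg ha]
          simp only [pvRank]
          generalize pvDictGet pvPriority a = g
          cases g <;> cases best <;> rfl
        have hfc : (a :: t).filter (fun item => item ≠ "") =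
            a :: t.filter (fun item => item ≠ "") := by
          simp [ha]
        rw [List.foldl_cons, hstep, ih, hfc, pvMin_cons, ← pvOmin_assoc]
        simp only [List.isEmpty_cons, Bool.not_false, Bool.or_true, Bool.true_or]

-- a successful lookup is a member of the association list
theorem pvDictGet_mem (d : List (String × Int)) (k : String) (v : Int)
    (h : pvDictGet d k = some v) : (k, v) ∈ d := by
  induction d with
  | nil => cases h
  | cons p rest ih =>
      obtain ⟨k', v'⟩ := p
      simp only [pvDictGet] at h
      split_ifs at h with e
      · subst e
        rw [Option.some.inj h]
        exact List.mem_cons_self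
      · exact List.mem_cons_of_mem _ (ih h)

-- pvRank characterized: which strings carry which rank
theorem pvRank_some (x : String) (r : Int) (h : pvRank x = some r) :
    (x = "fallback_checksum_mismatch" ∧ r = 0) ∨
    (x = "fallback_contract_failed" ∧ r = 1) ∨
    ((x = "fallback_metadata_missing" ∨ x = "fallback_metadata_invalid_json" ∨ x = "fallback_metadata_flag_invalid" ∨ x = "fallback_metadata_stage_mismatch") ∧ r = 2) ∨
    ((x = "fallback_contract_missing" ∨ x = "fallback_contract_invalid_json") ∧ r = 3) ∨
    ((x = "fallback_checksum_missing" ∨ x = "fallback_payload_missing_or_invalid") ∧ r = 4) ∨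
    (x = "fallback_artifact_stale" ∧ r = 5) ∨
    ((x = "fallback_generated_at_missing" ∨ x = "fallback_generated_at_unparseable") ∧ r = 6) := by
  have hm : (x, r) ∈ pvPriority := pvDictGet_mem pvPriority x r h
  simp only [pvPriority, List.mem_cons, List.not_mem_nil, or_false, Prod.mk.injEq] at hm
  rcases hm with ⟨hx, hr⟩ | ⟨hx, hr⟩ | ⟨hx, hr⟩ | ⟨hx, hr⟩ | ⟨hx, hr⟩ | ⟨hx, hr⟩ | ⟨hx, hr⟩ | ⟨hx, hr⟩ | ⟨hx, hr⟩ | ⟨hx, hr⟩ | ⟨hx, hr⟩ | ⟨hx, hr⟩ | ⟨hx, hr⟩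
  · exact Or.inl ⟨hx, hr⟩
  · exact Or.inr (Or.inl ⟨hx, hr⟩)
  · exact Or.inr (Or.inr (Or.inl ⟨Or.inl hx, hr⟩))
  · exact Or.inr (Or.inr (Or.inl ⟨Or.inr (Or.inl hx), hr⟩))
  · exact Or.inr (Or.inr (Or.inl ⟨Or.inr (Or.inr (Or.inl hx)), hr⟩))
  · exact Or.inr (Or.inr (Or.inl ⟨Or.inr (Or.inr (Or.inr hx)), hr⟩))
  · exact Or.inr (Or.inr (Or.inr (Or.inl ⟨Or.inl hx, hr⟩)))
  · exact Or.inr (Or.inr (Or.inr (Or.inl ⟨Or.inr hx, hr⟩)))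
  · exact Or.inr (Or.inr (Or.inr (Or.inr (Or.inl ⟨Or.inl hx, hr⟩))))
  · exact Or.inr (Or.inr (Or.inr (Or.inr (Or.inl ⟨Or.inr hx, hr⟩))))
  · exact Or.inr (Or.inr (Or.inr (Or.inr (Or.inr (Or.inl ⟨hx, hr⟩)))))
  · exact Or.inr (Or.inr (Or.inr (Or.inr (Or.inr (Or.inr ⟨Or.inl hx, hr⟩)))))
  · exact Or.inr (Or.inr (Or.inr (Or.inr (Or.inr (Or.inr ⟨Or.inr hx, hr⟩)))))

-- pvMin l = some r is witnessed by a member of rank r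
theorem pvMin_mem (l : List String) (r : Int) (h : pvMin l = some r) :
    ∃ x ∈ l, pvRank x = some r := by
  induction l with
  | nil => cases h
  | cons a t ih =>
      rw [pvMin_cons] at h
      cases hra : pvRank a with
      | none =>
          rw [hra, pvOmin_none_left] at h
          obtain ⟨x, hx, hrx⟩ := ih h
          exact ⟨x, List.mem_cons_of_mem _ hx, hrx⟩
      | some ra =>
          cases hmt : pvMin t with
          | none =>
              rw [hra, hmt] at h
              exact ⟨a, List.mem_cons_self, by rw [hra]; exact h⟩
          | some rt =>
              rw [hra, hmt] at h
              simp only [pvOmin] at h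
              split_ifs at h
              · obtain ⟨x, hx, hrx⟩ := ih (by rw [hmt, h])
                exact ⟨x, List.mem_cons_of_mem _ hx, hrx⟩
              · exact ⟨a, List.mem_cons_self, by rw [hra]; exact congrArg some (Option.some.inj h)⟩

-- the min is a lower bound: a member of rank r forces pvMin l = some r' with r' ≤ r
theorem pvMin_le (l : List String) (x : String) (r : Int)
    (hx : x ∈ l) (hr : pvRank x = some r) :
    ∃ r', pvMin l = some r' ∧ r' ≤ r := by
  induction l with
  | nil => cases hx
  | cons a t ih =>
      rw [pvMin_cons]
      rcases List.mem_cons.mp hx with rfl | hxt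
      · rw [hr]
        cases hmt : pvMin t with
        | none => exact ⟨r, rfl, le_refl r⟩
        | some rt =>
            simp only [pvOmin]
            split_ifs with hlt
            · exact ⟨rt, rfl, le_of_lt hlt⟩
            · exact ⟨r, rfl, le_refl r⟩
      · obtain ⟨r', hmt, hle⟩ := ih hxt
        rw [hmt]
        cases hra : pvRank a with
        | none => exact ⟨r', pvOmin_none_left _, hle⟩
        | some ra =>
            simp only [pvOmin]
            split_ifs with hlt
            · exact ⟨r', rfl, hle⟩
            · exact ⟨ra, rfl, le_trans (not_lt.mp hlt) hle⟩

-- ===== VERDICT (by name: the statement is the Claim_ definition above) =====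
theorem fallback_repair_guidance_py_spec : Claim_equal_fallback_repair_guidance_py := by
  intro issues _
  unfold Spec_fallback_repair_guidance_py fallback_repair_guidance_py fallback_repair_guidance_py_alt
  rw [pvLoop_eq]
  simp only [Bool.false_or, pvOmin_none_left]
  set f := issues.filter (fun item => item ≠ "") with hfdef
  by_cases hfe : f = []
  · rw [if_pos hfe, hfe]
    rfl
  · have hie : (!f.isEmpty) = true := by
      simp [hfe]
    rw [if_neg hfe, hie, if_neg (show ¬(true = false) by decide)]
    by_cases h0 : f.contains "fallback_checksum_mismatch"
    · obtain ⟨r', hm, hle⟩ := pvMin_le f _ 0 (by simpa using h0) (by decide)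
      have hr0 : r' = 0 := by
        rcases pvRank_some _ _ (pvMin_mem f r' hm).choose_spec.2 with
          ⟨_, hr⟩ | ⟨_, hr⟩ | ⟨_, hr⟩ | ⟨_, hr⟩ | ⟨_, hr⟩ | ⟨_, hr⟩ | ⟨_, hr⟩ <;> omega
      rw [if_pos h0, hm, hr0]
      rfl
    · have h0' : "fallback_checksum_mismatch" ∉ f := by simpa using h0
      rw [if_neg h0]
      by_cases h1 : f.contains "fallback_contract_failed"
      · obtain ⟨r', hm, hle⟩ := pvMin_le f _ 1 (by simpa using h1) (by decide)
        obtain ⟨x, hxf, hrx⟩ := pvMin_mem f r' hm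
        have hr1 : r' = 1 := by
          rcases pvRank_some _ _ hrx with
            ⟨hx, hr⟩ | ⟨_, hr⟩ | ⟨_, hr⟩ | ⟨_, hr⟩ | ⟨_, hr⟩ | ⟨_, hr⟩ | ⟨_, hr⟩
          · exact absurd (hx ▸ hxf) h0'
          all_goals omega
        rw [if_pos h1, hm, hr1]
        rfl
      · have h1' : "fallback_contract_failed" ∉ f := by simpa using h1
        rw [if_neg h1]
        by_cases h2 : (f.contains "fallback_metadata_missing" || f.contains "fallback_metadata_invalid_json" || f.contains "fallback_metadata_flag_invalid" || f.contains "fallback_metadata_stage_mismatch") = true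
        · have hc2 : ∃ c ∈ f, pvRank c = some 2 := by
            rcases Bool.or_eq_true_iff.mp h2 with h | h
            rcases Bool.or_eq_true_iff.mp h with h | h
            rcases Bool.or_eq_true_iff.mp h with h | h
            · exact ⟨_, by simpa using h, by decide⟩
            · exact ⟨_, by simpa using h, by decide⟩
            · exact ⟨_, by simpa using h, by decide⟩
            · exact ⟨_, by simpa using h, by decide⟩
          obtain ⟨c, hcf, hrc⟩ := hc2
          obtain ⟨r', hm, hle⟩ := pvMin_le f c 2 hcf hrc
          obtain ⟨x, hxf, hrx⟩ := pvMin_mem f r' hm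
          have hr2 : r' = 2 := by
            rcases pvRank_some _ _ hrx with
              ⟨hx, hr⟩ | ⟨hx, hr⟩ | ⟨_, hr⟩ | ⟨_, hr⟩ | ⟨_, hr⟩ | ⟨_, hr⟩ | ⟨_, hr⟩
            · exact absurd (hx ▸ hxf) h0'
            · exact absurd (hx ▸ hxf) h1'
            all_goals omega
          rw [if_pos h2, hm, hr2]
          rfl
        · obtain ⟨⟨⟨h2a, h2b⟩, h2c⟩, h2d⟩ :
              (("fallback_metadata_missing" ∉ f ∧ "fallback_metadata_invalid_json" ∉ f) ∧ "fallback_metadata_flag_invalid" ∉ f) ∧ "fallback_metadata_stage_mismatch" ∉ f := by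
            simpa [not_or] using h2
          rw [if_neg h2]
          by_cases h3 : (f.contains "fallback_contract_missing" || f.contains "fallback_contract_invalid_json") = true
          · have hc3 : ∃ c ∈ f, pvRank c = some 3 := by
              rcases Bool.or_eq_true_iff.mp h3 with h | h
              · exact ⟨_, by simpa using h, by decide⟩
              · exact ⟨_, by simpa using h, by decide⟩
            obtain ⟨c, hcf, hrc⟩ := hc3
            obtain ⟨r', hm, hle⟩ := pvMin_le f c 3 hcf hrc
            obtain ⟨x, hxf, hrx⟩ := pvMin_mem f r' hm
            have hr3 : r' = 3 := by
              rcases pvRank_some _ _ hrx with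
                ⟨hx, hr⟩ | ⟨hx, hr⟩ | ⟨hx, hr⟩ | ⟨_, hr⟩ | ⟨_, hr⟩ | ⟨_, hr⟩ | ⟨_, hr⟩
              · exact absurd (hx ▸ hxf) h0'
              · exact absurd (hx ▸ hxf) h1'
              · rcases hx with rfl | rfl | rfl | rfl
                exacts [absurd hxf h2a, absurd hxf h2b, absurd hxf h2c, absurd hxf h2d]
              all_goals omega
            rw [if_pos h3, hm, hr3]
            rfl
          · obtain ⟨h3a, h3b⟩ : "fallback_contract_missing" ∉ f ∧ "fallback_contract_invalid_json" ∉ f := by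
              simpa [not_or] using h3
            rw [if_neg h3]
            by_cases h4 : (f.contains "fallback_checksum_missing" || f.contains "fallback_payload_missing_or_invalid") = true
            · have hc4 : ∃ c ∈ f, pvRank c = some 4 := by
                rcases Bool.or_eq_true_iff.mp h4 with h | h
                · exact ⟨_, by simpa using h, by decide⟩
                · exact ⟨_, by simpa using h, by decide⟩
              obtain ⟨c, hcf, hrc⟩ := hc4
              obtain ⟨r', hm, hle⟩ := pvMin_le f c 4 hcf hrc
              obtain ⟨x, hxf, hrx⟩ := pvMin_mem f r' hm
              have hr4 : r' = 4 := by
                rcases pvRank_some _ _ hrx with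
                  ⟨hx, hr⟩ | ⟨hx, hr⟩ | ⟨hx, hr⟩ | ⟨hx, hr⟩ | ⟨_, hr⟩ | ⟨_, hr⟩ | ⟨_, hr⟩
                · exact absurd (hx ▸ hxf) h0'
                · exact absurd (hx ▸ hxf) h1'
                · rcases hx with rfl | rfl | rfl | rfl
                  exacts [absurd hxf h2a, absurd hxf h2b, absurd hxf h2c, absurd hxf h2d]
                · rcases hx with rfl | rfl
                  exacts [absurd hxf h3a, absurd hxf h3b]
                all_goals omega
              rw [if_pos h4, hm, hr4]
              rfl
            · obtain ⟨h4a, h4b⟩ : "fallback_checksum_missing" ∉ f ∧ "fallback_payload_missing_or_invalid" ∉ f := by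
                simpa [not_or] using h4
              rw [if_neg h4]
              by_cases h5 : f.contains "fallback_artifact_stale"
              · obtain ⟨r', hm, hle⟩ := pvMin_le f _ 5 (by simpa using h5) (by decide)
                obtain ⟨x, hxf, hrx⟩ := pvMin_mem f r' hm
                have hr5 : r' = 5 := by
                  rcases pvRank_some _ _ hrx with
                    ⟨hx, hr⟩ | ⟨hx, hr⟩ | ⟨hx, hr⟩ | ⟨hx, hr⟩ | ⟨hx, hr⟩ | ⟨_, hr⟩ | ⟨_, hr⟩
                  · exact absurd (hx ▸ hxf) h0'
                  · exact absurd (hx ▸ hxf) h1'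
                  · rcases hx with rfl | rfl | rfl | rfl
                    exacts [absurd hxf h2a, absurd hxf h2b, absurd hxf h2c, absurd hxf h2d]
                  · rcases hx with rfl | rfl
                    exacts [absurd hxf h3a, absurd hxf h3b]
                  · rcases hx with rfl | rfl
                    exacts [absurd hxf h4a, absurd hxf h4b]
                  all_goals omega
                rw [if_pos h5, hm, hr5]
                rfl
              · have h5' : "fallback_artifact_stale" ∉ f := by simpa using h5
                rw [if_neg h5]
                by_cases h6 : (f.contains "fallback_generated_at_missing" || f.contains "fallback_generated_at_unparseable") = true
                · have hc6 : ∃ c ∈ f, pvRank c = some 6 := by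
                    rcases Bool.or_eq_true_iff.mp h6 with h | h
                    · exact ⟨_, by simpa using h, by decide⟩
                    · exact ⟨_, by simpa using h, by decide⟩
                  obtain ⟨c, hcf, hrc⟩ := hc6
                  obtain ⟨r', hm, hle⟩ := pvMin_le f c 6 hcf hrc
                  obtain ⟨x, hxf, hrx⟩ := pvMin_mem f r' hm
                  have hr6 : r' = 6 := by
                    rcases pvRank_some _ _ hrx with
                      ⟨hx, hr⟩ | ⟨hx, hr⟩ | ⟨hx, hr⟩ | ⟨hx, hr⟩ | ⟨hx, hr⟩ | ⟨hx, hr⟩ | ⟨_, hr⟩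
                    · exact absurd (hx ▸ hxf) h0'
                    · exact absurd (hx ▸ hxf) h1'
                    · rcases hx with rfl | rfl | rfl | rfl
                      exacts [absurd hxf h2a, absurd hxf h2b, absurd hxf h2c, absurd hxf h2d]
                    · rcases hx with rfl | rfl
                      exacts [absurd hxf h3a, absurd hxf h3b]
                    · rcases hx with rfl | rfl
                      exacts [absurd hxf h4a, absurd hxf h4b]
                    · exact absurd (hx ▸ hxf) h5'
                    · omega
                  rw [if_pos h6, hm, hr6]
                  rfl
                · obtain ⟨h6a, h6b⟩ : "fallback_generated_at_missing" ∉ f ∧ "fallback_generated_at_unparseable" ∉ f := by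
                    simpa [not_or] using h6
                  rw [if_neg h6]
                  have hmn : pvMin f = none := by
                    cases hm : pvMin f with
                    | none => rfl
                    | some r =>
                        obtain ⟨x, hxf, hrx⟩ := pvMin_mem f r hm
                        exfalso
                        rcases pvRank_some _ _ hrx with
                          ⟨hx, _⟩ | ⟨hx, _⟩ | ⟨hx, _⟩ | ⟨hx, _⟩ | ⟨hx, _⟩ | ⟨hx, _⟩ | ⟨hx, _⟩
                        · exact h0' (hx ▸ hxf)
                        · exact h1' (hx ▸ hxf)
                        · rcases hx with rfl | rfl | rfl | rfl
                          exacts [h2a hxf, h2b hxf, h2c hxf, h2d hxf]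
                        · rcases hx with rfl | rfl
                          exacts [h3a hxf, h3b hxf]
                        · rcases hx with rfl | rfl
                          exacts [h4a hxf, h4b hxf]
                        · exact h5' (hx ▸ hxf)
                        · rcases hx with rfl | rfl
                          exacts [h6a hxf, h6b hxf]
                  rw [hmn]
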